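-- pv_equiv track=rewrite | github.com/vabresto/vb-kb | kb/generate_legacy_data.py | strip_leading_h1
-- ===== SOURCE A (Python) =====
-- def strip_leading_h1(body: str) -> str:
--     lines = body.splitlines()
--     index = 0
--     while index < len(lines) and not lines[index].strip():
--         index += 1
--     if index < len(lines) and lines[index].startswith("# "):
--         index += 1
--         while index < len(lines) and not lines[index].strip():
--             index += 1
--     return "\n".join(lines[index:]).strip()
-- ===== SOURCE B (Python) =====
-- def strip_leading_h1(body: str) -> str:
--     # Character-level: normalize line endings, skip the leading whitespace run with one
--     # char pointer; a leading H1 is a '#'+' ' at that position sitting at a line start;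
--     # if found, cut everything through the end of that line with find().
--     s = "\n".join(body.splitlines())
--     p = 0
--     while p < len(s) and s[p].isspace():
--         p += 1
--     if s[p:p + 2] == "# " and (p == 0 or s[p - 1] == "\n"):
--         nl = s.find("\n", p)
--         s = "" if nl == -1 else s[nl + 1:]
--     return s.strip()
-- ===== Notes on version B (the rewrite author's own statement) =====
-- stated objective: alternative
-- what changed: B never walks a list of lines: after normalizing line endings it works on the flat string with a single character pointer (skip the leading whitespace run, test for '# ' anchored at a line start via the preceding character, and cut through the next newline with find), where A iterates over splitlines() output with two index-advancing while loops over whole-line predicates.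
import Mathlib
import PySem

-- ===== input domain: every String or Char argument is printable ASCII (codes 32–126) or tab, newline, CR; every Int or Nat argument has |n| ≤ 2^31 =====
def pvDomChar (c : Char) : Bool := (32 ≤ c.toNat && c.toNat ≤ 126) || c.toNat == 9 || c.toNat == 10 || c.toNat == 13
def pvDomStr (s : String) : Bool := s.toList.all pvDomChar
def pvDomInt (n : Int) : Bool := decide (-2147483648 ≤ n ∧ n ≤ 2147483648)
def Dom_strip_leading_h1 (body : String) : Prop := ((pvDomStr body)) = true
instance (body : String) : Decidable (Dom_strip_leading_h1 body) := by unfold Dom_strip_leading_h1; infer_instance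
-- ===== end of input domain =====

-- B replaces A's line-list walk (two index loops over whole-line predicates) by a single
-- character pointer over the normalized flat string plus one find(); return value only.

-- ===== PORT A =====
-- A's 'while index < len(lines) and not lines[index].strip(): index += 1'
def pvA_advance (lines : List (List Char)) (index : Nat) : Nat :=
  if h : index < lines.length ∧ PySem.Chars.strip (lines.getD index []) = [] then
    pvA_advance lines (index + 1)
  else index
termination_by lines.length - index
decreasing_by omega

def strip_leading_h1 (body : String) : String :=
  let lines := PySem.Chars.splitlines body.toList
  let index := pvA_advance lines 0
  let index :=
    if index < lines.length ∧ PySem.Chars.startswith (lines.getD index []) ['#', ' '] = true then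
      pvA_advance lines (index + 1)
    else index
  String.ofList (PySem.Chars.strip (PySem.Chars.join ['\n'] (PySem.List.slice lines (some (index : Int)) none)))

-- ===== PORT B =====
-- Source B's 'while p < len(s) and s[p].isspace(): p += 1'
def pvB_skip (cs : List Char) (p : Nat) : Nat :=
  if h : p < cs.length ∧ PySem.Chars.isspace (cs.getD p ' ') = true then
    pvB_skip cs (p + 1)
  else p
termination_by cs.length - p
decreasing_by omega

-- Source B's body after 's = "\n".join(body.splitlines())': char pointer, boundary test, find
def pvBcore (s : List Char) : List Char :=
  let p := pvB_skip s 0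
  let s' :=
    if PySem.List.slice s (some (p : Int)) (some ((p : Int) + 2)) = ['#', ' '] ∧
        (p = 0 ∨ PySem.List.pyGet? s ((p : Int) - 1) = some '\n') then
      let nl := PySem.Chars.findFrom s ['\n'] (p : Int) none
      if nl = -1 then [] else PySem.List.slice s (some (nl + 1)) none
    else s
  PySem.Chars.strip s'

def strip_leading_h1_alt (body : String) : String :=
  String.ofList (pvBcore (PySem.Chars.join ['\n'] (PySem.Chars.splitlines body.toList)))

-- ===== PRECONDITION & SPEC =====
def Spec_strip_leading_h1 (body : String) (out : String) : Prop := out = strip_leading_h1_alt body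
instance (body : String) (out : String) : Decidable (Spec_strip_leading_h1 body out) := by unfold Spec_strip_leading_h1; infer_instance

-- ===== CLAIM (what is proved, stated in full; the proofs are below) =====
def Claim_equal_strip_leading_h1 : Prop := ∀ (body : String), Dom_strip_leading_h1 body → Spec_strip_leading_h1 body (strip_leading_h1 body)

-- ===== LEMMAS AND PROOFS =====

-- the blank-line predicate A branches on
def pvBlank (l : List Char) : Bool := decide (PySem.Chars.strip l = [])

-- the common normal form both ports are reduced to
def pvAval (lines : List (List Char)) : List Char :=
  let t := lines.dropWhile pvBlank
  if t ≠ [] ∧ PySem.Chars.startswith (t.headD []) ['#', ' '] = true then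
    PySem.Chars.strip (PySem.Chars.join ['\n'] t.tail)
  else PySem.Chars.strip (PySem.Chars.join ['\n'] lines)

theorem pvA_advance_spec (lines : List (List Char)) (i : Nat) :
    pvA_advance lines i = i + ((lines.drop i).takeWhile pvBlank).length := by
  unfold pvA_advance
  split
  · rename_i h
    rw [pvA_advance_spec lines (i + 1)]
    rw [List.drop_eq_getElem_cons h.1, List.takeWhile_cons]
    have hb : pvBlank lines[i] = true := by
      simp only [pvBlank, decide_eq_true_eq]
      rw [← List.getD_eq_getElem lines [] h.1]
      exact h.2
    rw [hb]
    simp; omega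
  · rename_i h
    by_cases hl : i < lines.length
    · have hb : pvBlank lines[i] = false := by
        simp only [pvBlank, ← List.getD_eq_getElem lines [] hl]
        simp only [not_and] at h
        simpa using h hl
      rw [List.drop_eq_getElem_cons hl, List.takeWhile_cons, hb]
      simp
    · rw [List.drop_eq_nil_of_le (by omega)]; simp
termination_by lines.length - i
decreasing_by omega

theorem pvB_skip_spec (cs : List Char) (i : Nat) :
    pvB_skip cs i = i + ((cs.drop i).takeWhile PySem.Chars.isspace).length := by
  unfold pvB_skip
  split
  · rename_i h
    rw [pvB_skip_spec cs (i + 1)]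
    rw [List.drop_eq_getElem_cons h.1, List.takeWhile_cons]
    have hb : PySem.Chars.isspace cs[i] = true := by
      rw [← List.getD_eq_getElem cs ' ' h.1]; exact h.2
    rw [hb]
    simp; omega
  · rename_i h
    by_cases hl : i < cs.length
    · have hb : PySem.Chars.isspace cs[i] = false := by
        rw [← List.getD_eq_getElem cs ' ' hl]
        simp only [not_and] at h
        simpa using h hl
      rw [List.drop_eq_getElem_cons hl, List.takeWhile_cons, hb]
      simp
    · rw [List.drop_eq_nil_of_le (by omega)]; simp
termination_by cs.length - i
decreasing_by omega

theorem drop_takeWhile_len {α : Type} (p : α → Bool) (l : List α) (i : Nat) :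
    l.drop (i + ((l.drop i).takeWhile p).length) = (l.drop i).dropWhile p := by
  rw [← List.drop_drop]
  generalize l.drop i = xs
  induction xs with
  | nil => rfl
  | cons a t ih =>
    by_cases h : p a <;> simp [h, ih]

theorem strip_eq_nil_iff (l : List Char) :
    PySem.Chars.strip l = [] ↔ ∀ c ∈ l, PySem.Chars.isspace c = true := by
  constructor
  · intro h c hc
    simp only [PySem.Chars.strip, PySem.Chars.rstrip, PySem.Chars.lstrip,
      List.reverse_eq_nil_iff] at h
    have hd : ∀ x ∈ List.dropWhile PySem.Chars.isspace l, PySem.Chars.isspace x = true := by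
      intro x hx
      exact List.dropWhile_eq_nil_iff.mp h x (by simpa using hx)
    rcases List.mem_append.mp (by
      rw [List.takeWhile_append_dropWhile (p := PySem.Chars.isspace)]; exact hc) with hm | hm
    · exact List.mem_takeWhile_imp hm
    · exact hd c hm
  · intro h
    have : PySem.Chars.lstrip l = [] := by
      simp only [PySem.Chars.lstrip]
      exact List.dropWhile_eq_nil_iff.mpr h
    simp [PySem.Chars.strip, this, PySem.Chars.rstrip]

theorem strip_ws_prefix (w x : List Char) (hw : ∀ c ∈ w, PySem.Chars.isspace c = true) :
    PySem.Chars.strip (w ++ x) = PySem.Chars.strip x := by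
  simp only [PySem.Chars.strip, PySem.Chars.lstrip]
  rw [List.dropWhile_append]
  simp [List.dropWhile_eq_nil_iff.mpr hw]

theorem strip_join_dropWhile (xs : List (List Char)) :
    PySem.Chars.strip (PySem.Chars.join ['\n'] (xs.dropWhile pvBlank))
      = PySem.Chars.strip (PySem.Chars.join ['\n'] xs) := by
  induction xs with
  | nil => rfl
  | cons a t ih =>
    by_cases h : pvBlank a
    · rw [List.dropWhile_cons_of_pos h, ih]
      have hw : ∀ c ∈ a, PySem.Chars.isspace c = true := by
        simp only [pvBlank, decide_eq_true_eq] at h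
        exact (strip_eq_nil_iff a).mp h
      cases t with
      | nil =>
        rw [PySem.Chars.join_nil, PySem.Chars.join_singleton, (strip_eq_nil_iff a).mpr hw]
        decide
      | cons b l =>
        rw [PySem.Chars.join_cons_cons]
        have : a ++ ['\n'] ++ PySem.Chars.join ['\n'] (b :: l)
            = (a ++ ['\n']) ++ PySem.Chars.join ['\n'] (b :: l) := by simp
        rw [this, strip_ws_prefix]
        intro c hc
        rcases List.mem_append.mp hc with hm | hm
        · exact hw c hm
        · simp at hm; subst hm; decide
    · rw [List.dropWhile_cons_of_neg (by simp [h])]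

-- A reduces to pvAval
theorem A_eq_pvAval (body : String) :
    strip_leading_h1 body
      = String.ofList (pvAval (PySem.Chars.splitlines body.toList)) := by
  unfold strip_leading_h1 pvAval
  simp only []
  set lines := PySem.Chars.splitlines body.toList with hldef
  have h0 : pvA_advance lines 0 = (lines.takeWhile pvBlank).length := by
    rw [pvA_advance_spec]; simp
  set k := pvA_advance lines 0 with hk
  have hdk : lines.drop k = lines.dropWhile pvBlank := by
    rw [h0]
    have := drop_takeWhile_len pvBlank lines 0
    simpa using this
  by_cases hg : k < lines.length ∧ PySem.Chars.startswith (lines.getD k []) ['#', ' '] = true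
  · rw [if_pos hg]
    have hcons : lines.dropWhile pvBlank = lines[k] :: lines.drop (k + 1) := by
      rw [← hdk]
      exact List.drop_eq_getElem_cons hg.1
    have hguard : (lines.dropWhile pvBlank ≠ [] ∧
        PySem.Chars.startswith ((lines.dropWhile pvBlank).headD []) ['#', ' '] = true) := by
      constructor
      · rw [hcons]; simp
        exact hg.1
      · rw [hcons]
        simp only [List.headD_cons]
        rw [← List.getD_eq_getElem lines [] hg.1]
        exact hg.2
    rw [if_pos hguard, hcons]
    rw [PySem.List.slice_from _ (by positivity)]
    simp only [Int.toNat_natCast]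
    rw [pvA_advance_spec lines (k + 1), drop_takeWhile_len pvBlank lines (k + 1)]
    rw [strip_join_dropWhile]
    simp
  · rw [if_neg hg]
    have hguard : ¬ (lines.dropWhile pvBlank ≠ [] ∧
        PySem.Chars.startswith ((lines.dropWhile pvBlank).headD []) ['#', ' '] = true) := by
      intro hc
      apply hg
      have hne := hc.1
      have hk_lt : k < lines.length := by
        by_contra hge
        rw [← hdk, List.drop_eq_nil_of_le (by omega)] at hne
        exact hne rfl
      refine ⟨hk_lt, ?_⟩
      have hcons : lines.dropWhile pvBlank = lines[k] :: lines.drop (k + 1) := by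
        rw [← hdk]
        exact List.drop_eq_getElem_cons hk_lt
      rw [hcons] at hc
      have h2 := hc.2
      simp only [List.headD_cons] at h2
      rw [← List.getD_eq_getElem lines [] hk_lt] at h2
      exact h2
    rw [if_neg hguard]
    rw [PySem.List.slice_from _ (by positivity)]
    simp only [Int.toNat_natCast]
    rw [hdk, strip_join_dropWhile]

-- === B-side lemmas ===

theorem slice_take_two (xs : List Char) (p : Nat) :
    PySem.List.slice xs (some (p : Int)) (some ((p : Int) + 2)) = (xs.drop p).take 2 := by
  simp only [PySem.List.slice, PySem.List.clampIdx]
  have h1 : ¬ ((p : Int) < 0) := by omega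
  have h2 : ¬ ((p : Int) + 2 < 0) := by omega
  simp only [if_neg h1, if_neg h2]
  have h3 : ((p : Int)).toNat = p := by omega
  have h4 : ((p : Int) + 2).toNat = p + 2 := by omega
  rw [h3, h4]
  by_cases h : xs.length ≤ p
  · have ha : min p xs.length = xs.length := min_eq_right h
    have hb : min (p + 2) xs.length = xs.length := min_eq_right (by omega)
    rw [ha, hb]
    simp [List.drop_length, List.drop_eq_nil_of_le h]
  · have ha : min p xs.length = p := min_eq_left (by omega)
    by_cases h5 : p + 2 ≤ xs.length
    · have hb : min (p + 2) xs.length = p + 2 := min_eq_left h5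
      rw [ha, hb]
      congr 1
      omega
    · have hb : min (p + 2) xs.length = xs.length := min_eq_right (by omega)
      rw [ha, hb]
      have hl : (xs.drop p).length = xs.length - p := List.length_drop ..
      rw [List.take_of_length_le (by omega), List.take_of_length_le (by omega)]

theorem findgo_no_nl (a : List Char) (h : '\n' ∉ a) (k : Nat) :
    PySem.Chars.find.go ['\n'] a k = -1 := by
  induction a generalizing k with
  | nil => simp [PySem.Chars.find.go]
  | cons c t ih =>
    simp at h
    rw [PySem.Chars.find.go]
    simp only [List.isPrefixOf, Bool.and_eq_true, beq_iff_eq]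
    rw [if_neg (by simp [h.1])]
    exact ih h.2 (k + 1)

theorem findgo_pos (a r : List Char) (h : '\n' ∉ a) (k : Nat) :
    PySem.Chars.find.go ['\n'] (a ++ '\n' :: r) k = (k : Int) + a.length := by
  induction a generalizing k with
  | nil =>
    rw [List.nil_append, PySem.Chars.find.go]
    simp [List.isPrefixOf]
  | cons c t ih =>
    simp at h
    rw [List.cons_append, PySem.Chars.find.go]
    simp only [List.isPrefixOf, Bool.and_eq_true, beq_iff_eq]
    rw [if_neg (by simp [h.1])]
    rw [ih h.2]
    simp
    ring

theorem splitlines_no_break (isB : Char → Bool) (s cur : List Char) (acc : List (List Char))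
    (hcur : ∀ c ∈ cur, isB c = false) (hacc : ∀ l ∈ acc, ∀ c ∈ l, isB c = false) :
    ∀ l ∈ PySem.Chars.splitlines.go isB s cur acc, ∀ c ∈ l, isB c = false := by
  fun_induction PySem.Chars.splitlines.go isB s cur acc <;> intro l hl c hc
  case case1 =>
    simp at hl
    exact hacc _ hl c hc
  case case2 =>
    simp at hl
    rcases hl with h | h
    · exact hacc _ h c hc
    · subst h; simp at hc; exact hcur c hc
  case case3 ih =>
    refine ih ?_ ?_ l hl c hc
    · intro c h; simp at h
    · intro l hl c hc
      simp at hl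
      rcases hl with h | h
      · subst h; simp at hc; exact hcur c hc
      · exact hacc _ h c hc
  case case4 hb ih =>
    refine ih ?_ ?_ l hl c hc
    · intro c h; simp at h
    · intro l hl c hc
      simp at hl
      rcases hl with h | h
      · subst h; simp at hc; exact hcur c hc
      · exact hacc _ h c hc
  case case5 hb ih =>
    refine ih ?_ ?_ l hl c hc
    · intro c2 h2
      simp at h2
      rcases h2 with h | h
      · subst h; simpa using hb
      · exact hcur _ h
    · exact hacc

theorem splitlines_no_nl (cs : List Char) :
    ∀ l ∈ PySem.Chars.splitlines cs, '\n' ∉ l := by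
  intro l hl hc
  have h := splitlines_no_break _ cs [] []
      (by simp) (by simp) l (by simpa [PySem.Chars.splitlines] using hl) '\n' hc
  exact absurd h (by decide)

-- shift lemma: a whitespace-only line plus its separator is transparent to pvBcore
theorem pvBcore_shift (l cs : List Char) (hw : ∀ c ∈ l, PySem.Chars.isspace c = true) :
    pvBcore (l ++ '\n' :: cs) = pvBcore cs := by
  have hassoc : l ++ '\n' :: cs = (l ++ ['\n']) ++ cs := by simp
  rw [hassoc]
  set w := l ++ ['\n'] with hwdef
  have hww : ∀ c ∈ w, PySem.Chars.isspace c = true := by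
    intro c hc
    rcases List.mem_append.mp hc with h | h
    · exact hw c h
    · simp at h; subst h; decide
  have hwlen : 1 ≤ w.length := by simp [hwdef]
  have hwlast : w[w.length - 1]? = some '\n' := by
    rw [hwdef]
    have : (l ++ ['\n']).length - 1 = l.length := by simp
    rw [this, List.getElem?_append_right (by omega)]
    simp
  unfold pvBcore
  simp only []
  have hpc : pvB_skip cs 0 = (cs.takeWhile PySem.Chars.isspace).length := by
    rw [pvB_skip_spec]; simp
  have hpcle : pvB_skip cs 0 ≤ cs.length := by
    rw [hpc]
    exact List.Sublist.length_le (List.takeWhile_sublist _)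
  have hps : pvB_skip (w ++ cs) 0 = w.length + pvB_skip cs 0 := by
    rw [pvB_skip_spec, pvB_skip_spec]
    simp only [List.drop_zero]
    rw [List.takeWhile_append]
    rw [if_pos (by rw [List.takeWhile_eq_self_iff.mpr hww])]
    simp
  set pc := pvB_skip cs 0 with hpcd
  rw [hps]
  have hdropeq : (w ++ cs).drop (w.length + pc) = cs.drop pc := List.drop_length_add_append pc
  have hg1 : (PySem.List.slice (w ++ cs) (some ((w.length + pc : Nat) : Int))
        (some (((w.length + pc : Nat) : Int) + 2)) = ['#', ' '])
      ↔ (PySem.List.slice cs (some (pc : Int)) (some ((pc : Int) + 2)) = ['#', ' ']) := by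
    rw [slice_take_two, slice_take_two, hdropeq]
  have hg2 : (w.length + pc = 0 ∨ PySem.List.pyGet? (w ++ cs) (((w.length + pc : Nat) : Int) - 1) = some '\n')
      ↔ (pc = 0 ∨ PySem.List.pyGet? cs ((pc : Int) - 1) = some '\n') := by
    have hcast : (((w.length + pc : Nat) : Int) - 1) = ((w.length + pc - 1 : Nat) : Int) := by
      omega
    rw [hcast, PySem.List.pyGet?_natCast]
    by_cases hpc0 : pc = 0
    · rw [hpc0]
      simp only [Nat.add_zero]
      rw [List.getElem?_append_left (by omega), hwlast]
      simp
    · have hc2 : ((pc : Int) - 1) = ((pc - 1 : Nat) : Int) := by omega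
      rw [hc2, PySem.List.pyGet?_natCast]
      rw [List.getElem?_append_right (by omega)]
      have : w.length + pc - 1 - w.length = pc - 1 := by omega
      rw [this]
      constructor
      · intro h
        rcases h with h | h
        · omega
        · exact Or.inr h
      · intro h
        rcases h with h | h
        · exact absurd h hpc0
        · exact Or.inr h
  by_cases hgc : PySem.List.slice cs (some (pc : Int)) (some ((pc : Int) + 2)) = ['#', ' '] ∧
      (pc = 0 ∨ PySem.List.pyGet? cs ((pc : Int) - 1) = some '\n')
  · rw [if_pos hgc, if_pos ⟨hg1.mpr hgc.1, hg2.mpr hgc.2⟩]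
    have hlen : w.length + pc ≤ (w ++ cs).length := by
      simp only [List.length_append]; omega
    rw [PySem.Chars.findFrom_natCast _ _ _ hlen, PySem.Chars.findFrom_natCast _ _ _ hpcle]
    rw [hdropeq]
    by_cases hf : PySem.Chars.find (cs.drop pc) ['\n'] = -1
    · rw [if_pos hf, if_pos hf]
      simp
    · rw [if_neg hf, if_neg hf]
      have hfge : 0 ≤ PySem.Chars.find (cs.drop pc) ['\n'] := by
        have := PySem.Chars.neg_one_le_find (cs.drop pc) ['\n']
        omega
      set f := PySem.Chars.find (cs.drop pc) ['\n'] with hfd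
      rw [if_neg (by omega), if_neg (by omega)]
      rw [PySem.List.slice_from _ (by omega), PySem.List.slice_from _ (by omega)]
      have hcast : (((w.length + pc : Nat) : Int) + f + 1).toNat
          = w.length + ((pc : Int) + f + 1).toNat := by omega
      rw [hcast, List.drop_length_add_append]
  · rw [if_neg hgc, if_neg (by
      intro hc
      exact hgc ⟨hg1.mp hc.1, hg2.mp hc.2⟩)]
    exact strip_ws_prefix w cs hww

theorem pvAval_blank_cons (l : List Char) (rest : List (List Char)) (hb : pvBlank l = true) :
    pvAval (l :: rest) = pvAval rest := by
  have hj : PySem.Chars.strip (PySem.Chars.join ['\n'] (l :: rest))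
      = PySem.Chars.strip (PySem.Chars.join ['\n'] rest) := by
    rw [← strip_join_dropWhile (l :: rest), ← strip_join_dropWhile rest,
      List.dropWhile_cons_of_pos hb]
  unfold pvAval
  simp only [List.dropWhile_cons_of_pos hb]
  split_ifs with h
  · rfl
  · exact hj

theorem pvBcore_all_ws (cs : List Char) (h : ∀ c ∈ cs, PySem.Chars.isspace c = true) :
    pvBcore cs = [] := by
  unfold pvBcore
  simp only []
  have hp : pvB_skip cs 0 = cs.length := by
    rw [pvB_skip_spec]
    simp [List.takeWhile_eq_self_iff.mpr h]
  rw [hp]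
  rw [if_neg (by
    intro hc
    have h1 := hc.1
    rw [slice_take_two, List.drop_length] at h1
    simp at h1)]
  exact (strip_eq_nil_iff cs).mpr h

-- the B-side guard is exactly 'first non-blank line starts with "# "'
theorem pvB_guard_iff (l rtail : List Char) (hnl : '\n' ∉ l)
    (hnb : PySem.Chars.strip l ≠ [])
    (hrt : rtail = [] ∨ ∃ cs', rtail = '\n' :: cs') :
    (PySem.List.slice (l ++ rtail) (some ((pvB_skip (l ++ rtail) 0 : Nat) : Int))
        (some (((pvB_skip (l ++ rtail) 0 : Nat) : Int) + 2)) = ['#', ' '] ∧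
      (pvB_skip (l ++ rtail) 0 = 0 ∨
        PySem.List.pyGet? (l ++ rtail) (((pvB_skip (l ++ rtail) 0 : Nat) : Int) - 1) = some '\n'))
    ↔ PySem.Chars.startswith l ['#', ' '] = true := by
  have hex : ¬ ∀ c ∈ l, PySem.Chars.isspace c = true :=
    fun hc => hnb ((strip_eq_nil_iff l).mpr hc)
  have hqle : (l.takeWhile PySem.Chars.isspace).length ≤ l.length :=
    List.Sublist.length_le (List.takeWhile_sublist _)
  have hq : (l.takeWhile PySem.Chars.isspace).length < l.length := by
    rcases Nat.lt_or_ge (l.takeWhile PySem.Chars.isspace).length l.length with h | h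
    · exact h
    · exfalso
      have heq : l.takeWhile PySem.Chars.isspace = l :=
        (List.takeWhile_sublist _).eq_of_length (by omega)
      exact hex fun c hc => List.mem_takeWhile_imp (heq ▸ hc)
  have hp : pvB_skip (l ++ rtail) 0 = (l.takeWhile PySem.Chars.isspace).length := by
    rw [pvB_skip_spec]
    simp only [List.drop_zero, List.takeWhile_append]
    rw [if_neg (by omega)]
    simp
  rw [hp]
  set q := (l.takeWhile PySem.Chars.isspace).length with hqd
  rw [slice_take_two, List.drop_append_of_le_length (by omega)]
  rw [PySem.Chars.startswith_iff]
  constructor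
  · rintro ⟨h1, h2⟩
    have hq0 : q = 0 := by
      rcases h2 with h2 | h2
      · exact h2
      · by_contra hq0
        have hcast : ((q : Int) - 1) = ((q - 1 : Nat) : Int) := by omega
        rw [hcast, PySem.List.pyGet?_natCast,
          List.getElem?_append_left (by omega)] at h2
        have hmem : l[q - 1]'(by omega) ∈ l := List.getElem_mem _
        rw [List.getElem?_eq_getElem (by omega)] at h2
        simp only [Option.some.injEq] at h2
        rw [h2] at hmem
        exact hnl hmem
    rw [hq0, List.drop_zero] at h1
    cases l with
    | nil => simp at hq
    | cons c l' =>
      cases l' with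
      | nil =>
        exfalso
        rcases hrt with hr | ⟨cs', hr⟩ <;> subst hr <;> simp at h1
      | cons c2 l'' =>
        simp at h1
        exact ⟨l'', by simp [h1.1, h1.2]⟩
  · intro hpre
    obtain ⟨t, ht⟩ := hpre
    have hl : l = '#' :: ' ' :: t := by rw [← ht]; rfl
    have hq0 : q = 0 := by
      rw [hqd, hl]
      rw [List.takeWhile_cons_of_neg (by decide)]
      rfl
    refine ⟨?_, Or.inl hq0⟩
    rw [hq0, List.drop_zero, hl]
    rfl

theorem pvBcore_nonblank (l rtail : List Char) (hnl : '\n' ∉ l)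
    (hnb : PySem.Chars.strip l ≠ [])
    (hrt : rtail = [] ∨ ∃ cs', rtail = '\n' :: cs') :
    pvBcore (l ++ rtail) =
      if PySem.Chars.startswith l ['#', ' '] = true then PySem.Chars.strip rtail.tail
      else PySem.Chars.strip (l ++ rtail) := by
  unfold pvBcore
  simp only []
  by_cases hsw : PySem.Chars.startswith l ['#', ' '] = true
  · rw [if_pos ((pvB_guard_iff l rtail hnl hnb hrt).mpr hsw), if_pos hsw]
    have hple : pvB_skip (l ++ rtail) 0 ≤ (l ++ rtail).length := by
      rw [pvB_skip_spec]
      simp only [List.drop_zero]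
      have := List.Sublist.length_le
        (List.takeWhile_sublist (l := l ++ rtail) PySem.Chars.isspace)
      omega
    rw [PySem.Chars.findFrom_natCast _ _ _ hple]
    rcases hrt with hr | ⟨cs', hr⟩ <;> subst hr
    · have hfind : PySem.Chars.find ((l ++ []).drop (pvB_skip (l ++ []) 0)) ['\n'] = -1 := by
        apply findgo_no_nl
        intro hmem
        exact hnl (List.mem_of_mem_drop (by simpa using hmem))
      rw [if_pos hfind, if_pos rfl]
      simp [PySem.Chars.strip, PySem.Chars.lstrip, PySem.Chars.rstrip]
    · have hdq : (l ++ '\n' :: cs').drop (pvB_skip (l ++ '\n' :: cs') 0)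
          = l.drop (pvB_skip (l ++ '\n' :: cs') 0) ++ '\n' :: cs' := by
        apply List.drop_append_of_le_length
        rw [pvB_skip_spec]
        simp only [List.drop_zero, List.takeWhile_append]
        split_ifs with hta
        · -- takeWhile exhausts l: impossible since l has a non-ws char
          exfalso
          have heq : l.takeWhile PySem.Chars.isspace = l :=
            (List.takeWhile_sublist _).eq_of_length hta
          exact hnb ((strip_eq_nil_iff l).mpr
            fun c hc => List.mem_takeWhile_imp (heq ▸ hc))
        · simp
          exact List.Sublist.length_le (List.takeWhile_sublist _)
      rw [hdq]
      have hnodrop : '\n' ∉ l.drop (pvB_skip (l ++ '\n' :: cs') 0) :=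
        fun hmem => hnl (List.mem_of_mem_drop hmem)
      have hple2 : pvB_skip (l ++ '\n' :: cs') 0 ≤ l.length := by
        rw [pvB_skip_spec]
        simp only [List.drop_zero, List.takeWhile_append]
        split_ifs with hta
        · exfalso
          have heq : l.takeWhile PySem.Chars.isspace = l :=
            (List.takeWhile_sublist _).eq_of_length hta
          exact hnb ((strip_eq_nil_iff l).mpr
            fun c hc => List.mem_takeWhile_imp (heq ▸ hc))
        · simp
          exact List.Sublist.length_le (List.takeWhile_sublist _)
      have hlen2 : pvB_skip (l ++ '\n' :: cs') 0
          + (l.drop (pvB_skip (l ++ '\n' :: cs') 0)).length = l.length := by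
        have := List.length_drop (l := l) (i := pvB_skip (l ++ '\n' :: cs') 0)
        omega
      rw [PySem.Chars.find]
      rw [findgo_pos _ _ hnodrop 0]
      simp only [Nat.cast_zero, zero_add]
      rw [if_neg (show ¬ (((l.drop (pvB_skip (l ++ '\n' :: cs') 0)).length : Int) = -1) by omega)]
      rw [if_neg (show ¬ (((pvB_skip (l ++ '\n' :: cs') 0 : Nat) : Int)
        + ((l.drop (pvB_skip (l ++ '\n' :: cs') 0)).length : Int) = -1) by omega)]
      rw [PySem.List.slice_from _ (by omega)]
      rw [show (((pvB_skip (l ++ '\n' :: cs') 0 : Nat) : Int)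
          + ((l.drop (pvB_skip (l ++ '\n' :: cs') 0)).length : Int) + 1).toNat
          = l.length + 1 from by omega]
      rw [show l ++ '\n' :: cs' = (l ++ ['\n']) ++ cs' by simp]
      rw [show l.length + 1 = (l ++ ['\n']).length + 0 by simp]
      rw [List.drop_length_add_append]
      simp
  · rw [if_neg (fun hc => hsw ((pvB_guard_iff l rtail hnl hnb hrt).mp hc)), if_neg hsw]

-- main B-side lemma
theorem B_eq_pvAval (lines : List (List Char)) (hnl : ∀ l ∈ lines, '\n' ∉ l) :
    pvBcore (PySem.Chars.join ['\n'] lines) = pvAval lines := by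
  have hAnil : pvAval [] = [] := by
    simp [pvAval, PySem.Chars.join_nil, PySem.Chars.strip, PySem.Chars.lstrip,
      PySem.Chars.rstrip]
  induction lines with
  | nil =>
    rw [PySem.Chars.join_nil, pvBcore_all_ws [] (by simp), hAnil]
  | cons l rest ih =>
    have hnl_l : '\n' ∉ l := hnl l (by simp)
    have hnl_rest : ∀ x ∈ rest, '\n' ∉ x := fun x hx => hnl x (by simp [hx])
    by_cases hb : pvBlank l = true
    · rw [pvAval_blank_cons l rest hb]
      have hw : ∀ c ∈ l, PySem.Chars.isspace c = true :=
        (strip_eq_nil_iff l).mp (by simpa [pvBlank] using hb)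
      cases rest with
      | nil =>
        rw [PySem.Chars.join_singleton, pvBcore_all_ws l hw, hAnil]
      | cons r rs =>
        rw [PySem.Chars.join_cons_cons,
          show l ++ ['\n'] ++ PySem.Chars.join ['\n'] (r :: rs)
            = l ++ '\n' :: PySem.Chars.join ['\n'] (r :: rs) by simp,
          pvBcore_shift l _ hw, ih hnl_rest]
    · have hnb : PySem.Chars.strip l ≠ [] := by simpa [pvBlank] using hb
      have hdw : (l :: rest).dropWhile pvBlank = l :: rest :=
        List.dropWhile_cons_of_neg (by simpa using hb)
      cases rest with
      | nil =>
        rw [show PySem.Chars.join ['\n'] [l] = l ++ [] by simp [PySem.Chars.join_singleton]]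
        rw [pvBcore_nonblank l [] hnl_l hnb (Or.inl rfl)]
        unfold pvAval
        simp only [hdw]
        by_cases hsw : PySem.Chars.startswith l ['#', ' '] = true
        · rw [if_pos hsw, if_pos (by simp [hsw])]
          rfl
        · rw [if_neg hsw, if_neg (by simp [hsw])]
          simp [PySem.Chars.join_singleton]
      | cons r rs =>
        rw [PySem.Chars.join_cons_cons,
          show l ++ ['\n'] ++ PySem.Chars.join ['\n'] (r :: rs)
            = l ++ '\n' :: PySem.Chars.join ['\n'] (r :: rs) by simp]
        rw [pvBcore_nonblank l _ hnl_l hnb (Or.inr ⟨_, rfl⟩)]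
        unfold pvAval
        simp only [hdw]
        by_cases hsw : PySem.Chars.startswith l ['#', ' '] = true
        · rw [if_pos hsw, if_pos (by simp [hsw])]
          simp
        · rw [if_neg hsw, if_neg (by simp [hsw])]
          rw [PySem.Chars.join_cons_cons]
          simp

-- ===== VERDICT (by name: the statement is the Claim_ definition above) =====
theorem strip_leading_h1_spec : Claim_equal_strip_leading_h1 := by
  intro body _
  unfold Spec_strip_leading_h1 strip_leading_h1_alt
  rw [A_eq_pvAval body, B_eq_pvAval _ (splitlines_no_nl body.toList)]
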